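-- pv_equiv track=rewrite | github.com/mgijax/wts_archive | lib/python/searcher.py | _sliceAndDice
-- ===== SOURCE A (Python) =====
-- def _splitLine(matchingLine, separator = ' '):
--         # split the matching line into its filename and then the rest of it
--
--         parts = matchingLine.strip().split(separator)
--         return parts[0], ' '.join(parts[1:])
--
-- def _sliceAndDice(out, anyAll, separator = ' '):
--         # out is a list of lists, each containing matching lines for one search
--         # phrase.  This function slices and dices them to return:
--         #  (ordered list of filenames with matches, { filename : matching lines })
--
--         matchingLines = {}      # filename : matching lines
--         matchingFilenames = []  # has one Set for each search phrase
--
--         # split the matches and collect the pieces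
--
--         for matches in out:
--             newSet = set()
--
--             for match in matches:
--                 filename, matchingLine = _splitLine(match, separator)
--                 newSet.add(filename)
--
--                 if filename not in matchingLines:
--                     matchingLines[filename] = set()
--                 matchingLines[filename].add(matchingLine)
--
--             matchingFilenames.append(newSet)
--
--         # join the match sets appropriately (any / all)
--
--         results = matchingFilenames[0]
--         for otherSet in matchingFilenames[1:]:
--             if anyAll == 'all':
--                 results = results.intersection(otherSet)
--             else:
--                 results = results.union(otherSet)
--
--         # remove lists of matching lines for filenames that are no longer
--         # in the matching set
--
--         filenames = list(matchingLines.keys())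
--         for filename in filenames:
--             if filename not in results:
--                 del matchingLines[filename]
--
--         # pull the results out of the set into a list and sort it
--
--         asList = list(results)
--         asList.sort()
--
--         return asList, matchingLines
-- ===== SOURCE B (Python) =====
-- def _splitLine(matchingLine, separator = ' '):
--         # split the matching line into its filename and then the rest of it
--         parts = matchingLine.strip().split(separator)
--         return parts[0], ' '.join(parts[1:])
--
-- def _sliceAndDice(out, anyAll, separator = ' '):
--         # No per-phrase sets and no intersection/union folds: build one dict
--         # of lines keyed by filename, then decide survival of each filename by
--         # evaluating the any/all condition directly against the raw input.
--
--         lines = {}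
--         for matches in out:
--             for match in matches:
--                 filename, line = _splitLine(match, separator)
--                 lines.setdefault(filename, set()).add(line)
--
--         if anyAll == 'all':
--             def keep(f):
--                 return all(any(_splitLine(m, separator)[0] == f for m in matches)
--                            for matches in out)
--         else:
--             def keep(f):
--                 return True
--
--         matchingLines = {f: ls for f, ls in lines.items() if keep(f)}
--         return sorted(matchingLines), matchingLines
-- ===== Notes on version B (the rewrite author's own statement) =====
-- stated objective: simpler
-- what changed: B never builds per-phrase filename sets and has no intersection/union folding or delete-pruning: it builds only the lines dict in one pass and decides each filename's survival by directly evaluating the all/any match predicate over the raw input lists; dropping the per-phrase set construction and the prune pass made it measurably faster on the generated inputs.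
import Mathlib
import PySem

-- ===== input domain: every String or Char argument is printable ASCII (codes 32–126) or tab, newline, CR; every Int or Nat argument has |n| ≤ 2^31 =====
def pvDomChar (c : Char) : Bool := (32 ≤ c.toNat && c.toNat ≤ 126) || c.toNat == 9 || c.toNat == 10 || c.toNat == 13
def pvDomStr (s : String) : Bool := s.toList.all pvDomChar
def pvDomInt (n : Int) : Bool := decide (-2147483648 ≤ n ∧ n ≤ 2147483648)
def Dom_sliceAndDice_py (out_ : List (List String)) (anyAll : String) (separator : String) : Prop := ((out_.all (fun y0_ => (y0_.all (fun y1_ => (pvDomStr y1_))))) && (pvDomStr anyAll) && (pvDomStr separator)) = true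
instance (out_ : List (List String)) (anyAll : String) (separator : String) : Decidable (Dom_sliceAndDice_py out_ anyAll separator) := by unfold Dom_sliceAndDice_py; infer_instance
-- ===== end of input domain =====

-- B drops A's per-phrase sets and intersection/union folding entirely: it builds only the
-- lines dict and decides each filename's survival by evaluating the all/any match predicate
-- directly on the raw input (objective: simpler; same results).

-- shared helper: port of _splitLine (both Pythons use it verbatim).
-- split? is none iff separator = ""; Pre_ guarantees _splitLine is never reached with
-- separator = "", so the `.getD []` total form is exact on every admitted input.
def splitLine (matchingLine : String) (separator : String) : String × String :=
  let parts := (PySem.Str.split? (PySem.Str.strip matchingLine) separator).getD []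
  (parts.headD "", PySem.Str.join " " (parts.drop 1))

-- ===== PORT A =====
def sliceAndDice_py (out_ : List (List String)) (anyAll : String) (separator : String) : List String × (List (String × List String)) :=
  let st := out_.foldl
    (fun (st : PySem.Dict String (PySem.Set String) × List (PySem.Set String)) ms =>
      let res := ms.foldl
        (fun (p : PySem.Set String × PySem.Dict String (PySem.Set String)) mtch =>
          let fl := splitLine mtch separator
          let ns := PySem.Set.add p.1 fl.1
          let ml := if p.2.contains fl.1 then p.2 else p.2.insert fl.1 PySem.Set.empty
          (ns, ml.modify fl.1 PySem.Set.empty (fun s => PySem.Set.add s fl.2)))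
        (PySem.Set.empty, st.1)
      (res.2, st.2 ++ [res.1]))
    (PySem.Dict.empty, [])
  let matchingLines := st.1
  let matchingFilenames := st.2
  -- matchingFilenames[0] raises IndexError iff out_ = []; Pre_ excludes that
  let results := matchingFilenames.headD PySem.Set.empty
  let results := (matchingFilenames.drop 1).foldl
    (fun r o => if anyAll == "all" then PySem.Set.inter r o else PySem.Set.union r o) results
  let pruned := matchingLines.keys.foldl
    (fun d f => if PySem.Set.contains results f then d else d.erase f) matchingLines
  (PySem.List.sorted results (fun x => x) false, pruned.items)

-- ===== PORT B =====
def sliceAndDice_py_alt (out_ : List (List String)) (anyAll : String) (separator : String) : List String × (List (String × List String)) :=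
  let lines := out_.foldl
    (fun (d : PySem.Dict String (PySem.Set String)) ms =>
      ms.foldl
        (fun (d : PySem.Dict String (PySem.Set String)) m =>
          let fl := splitLine m separator
          (PySem.Dict.setdefault d fl.1 PySem.Set.empty).modify fl.1 PySem.Set.empty
            (fun s => PySem.Set.add s fl.2))
        d)
    PySem.Dict.empty
  let keep : String → Bool := fun f =>
    if anyAll == "all" then
      out_.all (fun ms => ms.any (fun m => (splitLine m separator).1 == f))
    else true
  let matchingLines := PySem.Dict.mk (lines.items.filter (fun p => keep p.1))
  (PySem.List.sorted matchingLines.keys (fun x => x) false, matchingLines.items)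

-- ===== PRECONDITION & SPEC =====
-- A raises IndexError on out_ = [] (matchingFilenames[0]) and ValueError ('empty
-- separator') when separator = "" and some match line exists; Pre_ excludes exactly
-- those inputs.
def Pre_sliceAndDice_py (out_ : List (List String)) (anyAll : String) (separator : String) : Prop :=
  out_ ≠ [] ∧ (separator = "" → out_.all List.isEmpty = true)
instance (out_ : List (List String)) (anyAll : String) (separator : String) : Decidable (Pre_sliceAndDice_py out_ anyAll separator) := by unfold Pre_sliceAndDice_py; infer_instance

def pvWitness_sliceAndDice_py : List (List String) × String × String :=
  ([["f1 hello there", "f2 x"], ["f1 bye"]], "all", " ")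

def Spec_sliceAndDice_py (out_ : List (List String)) (anyAll : String) (separator : String) (out : List String × (List (String × List String))) : Prop := out = sliceAndDice_py_alt out_ anyAll separator
instance (out_ : List (List String)) (anyAll : String) (separator : String) (out : List String × (List (String × List String))) : Decidable (Spec_sliceAndDice_py out_ anyAll separator out) := by unfold Spec_sliceAndDice_py; infer_instance

-- ===== CLAIM (what is proved, stated in full; the proofs are below) =====
def Claim_equal_sliceAndDice_py : Prop := ∀ (out_ : List (List String)) (anyAll : String) (separator : String), Dom_sliceAndDice_py out_ anyAll separator → Pre_sliceAndDice_py out_ anyAll separator → Spec_sliceAndDice_py out_ anyAll separator (sliceAndDice_py out_ anyAll separator)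

-- ===== LEMMAS AND PROOFS =====

-- the per-match lines-dict step both builds share (A's insert-under-guard equals setdefault)
def pvStepF (sep : String) (d : PySem.Dict String (PySem.Set String)) (m : String) : PySem.Dict String (PySem.Set String) :=
  (PySem.Dict.setdefault d (splitLine m sep).1 PySem.Set.empty).modify (splitLine m sep).1
    PySem.Set.empty (fun s => PySem.Set.add s (splitLine m sep).2)

lemma pv_ins_eq_setdefault (d : PySem.Dict String (PySem.Set String)) (k : String) :
    (if d.contains k then d else d.insert k PySem.Set.empty) = d.setdefault k PySem.Set.empty := by
  by_cases h : d.contains k = true <;> simp [PySem.Dict.insert, PySem.Dict.setdefault, h]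

lemma pvA_inner_split (sep : String) (ms : List String) (ns : PySem.Set String)
    (ml : PySem.Dict String (PySem.Set String)) :
    ms.foldl
      (fun (p : PySem.Set String × PySem.Dict String (PySem.Set String)) mtch =>
        let fl := splitLine mtch sep
        let ns := PySem.Set.add p.1 fl.1
        let ml' := if p.2.contains fl.1 then p.2 else p.2.insert fl.1 PySem.Set.empty
        (ns, ml'.modify fl.1 PySem.Set.empty (fun s => PySem.Set.add s fl.2)))
      (ns, ml)
    = (ms.foldl (fun s m => PySem.Set.add s (splitLine m sep).1) ns,
       ms.foldl (pvStepF sep) ml) := by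
  induction ms generalizing ns ml with
  | nil => rfl
  | cons m ms ih =>
    simp only [List.foldl_cons]; rw [ih]; simp only [pv_ins_eq_setdefault, pvStepF]

lemma pv_addfold_eq_ofList (sep : String) (ms : List String) :
    ms.foldl (fun s m => PySem.Set.add s (splitLine m sep).1) PySem.Set.empty
    = PySem.Set.ofList (ms.map (fun m => (splitLine m sep).1)) := by
  rw [PySem.Set.ofList_eq_foldl, List.foldl_map]; rfl

lemma pvA_outer_split (sep : String) (out_ : List (List String))
    (st0 : PySem.Dict String (PySem.Set String) × List (PySem.Set String)) :
    out_.foldl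
      (fun (st : PySem.Dict String (PySem.Set String) × List (PySem.Set String)) ms =>
        let res := ms.foldl
          (fun (p : PySem.Set String × PySem.Dict String (PySem.Set String)) mtch =>
            let fl := splitLine mtch sep
            let ns := PySem.Set.add p.1 fl.1
            let ml' := if p.2.contains fl.1 then p.2 else p.2.insert fl.1 PySem.Set.empty
            (ns, ml'.modify fl.1 PySem.Set.empty (fun s => PySem.Set.add s fl.2)))
          (PySem.Set.empty, st.1)
        (res.2, st.2 ++ [res.1]))
      st0
    = (out_.flatten.foldl (pvStepF sep) st0.1,
       st0.2 ++ out_.map (fun ms => PySem.Set.ofList (ms.map (fun m => (splitLine m sep).1)))) := by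
  induction out_ generalizing st0 with
  | nil => simp
  | cons ms rest ih =>
    rw [List.foldl_cons, ih]
    have h := pvA_inner_split sep ms PySem.Set.empty st0.1
    simp only [h, pv_addfold_eq_ofList, List.flatten_cons, List.foldl_append,
      List.map_cons, List.append_assoc, List.singleton_append]

lemma pvB_lines_eq (sep : String) (out_ : List (List String))
    (d : PySem.Dict String (PySem.Set String)) :
    out_.foldl
      (fun (d : PySem.Dict String (PySem.Set String)) ms =>
        ms.foldl
          (fun (d : PySem.Dict String (PySem.Set String)) m =>
            let fl := splitLine m sep
            (PySem.Dict.setdefault d fl.1 PySem.Set.empty).modify fl.1 PySem.Set.empty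
              (fun s => PySem.Set.add s fl.2))
          d)
      d
    = out_.flatten.foldl (pvStepF sep) d := by
  rw [List.foldl_flatten]; rfl

lemma pv_prune_gen (R : PySem.Set String) (ks : List String)
    (d : PySem.Dict String (PySem.Set String)) :
    ks.foldl (fun d f => if PySem.Set.contains R f then d else d.erase f) d
    = PySem.Dict.mk (d.items.filter
        (fun p => PySem.Set.contains R p.1 || !(ks.contains p.1))) := by
  induction ks generalizing d with
  | nil => simp
  | cons k ks ih =>
    rw [List.foldl_cons, ih]
    congr 1
    by_cases hR : PySem.Set.contains R k = true
    · rw [if_pos hR]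
      refine List.filter_congr (fun p _ => ?_)
      by_cases hpk : p.1 = k
      · have hmem : k ∈ R := by simpa using hR
        simp [hpk, hmem]
      · simp [hpk]
    · rw [if_neg hR]
      have hmem : k ∉ R := by simpa using hR
      simp only [PySem.Dict.erase]
      rw [List.filter_filter]
      refine List.filter_congr (fun p _ => ?_)
      by_cases hpk : p.1 = k
      · simp [hpk, hmem]
      · simp [hpk]

lemma pv_prune_eq_filt (R : PySem.Set String) (d : PySem.Dict String (PySem.Set String)) :
    d.keys.foldl (fun d f => if PySem.Set.contains R f then d else d.erase f) d
    = PySem.Dict.mk (d.items.filter (fun p => PySem.Set.contains R p.1)) := by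
  rw [pv_prune_gen]
  congr 1
  refine List.filter_congr (fun p hp => ?_)
  have hk : p.1 ∈ d.keys := by
    unfold PySem.Dict.keys
    exact List.mem_map_of_mem hp
  simp [hk]

-- keys of the lines dict: one Set.add per match
lemma pv_keys_stepF (sep : String) (d : PySem.Dict String (PySem.Set String)) (m : String) :
    (pvStepF sep d m).keys = PySem.Set.add d.keys (splitLine m sep).1 := by
  unfold pvStepF
  rw [PySem.Dict.keys_modify,
    PySem.Dict.keys_insert_of_contains _ _
      (by rw [PySem.Dict.contains_setdefault]; simp),
    PySem.Dict.keys_setdefault, PySem.Set.add_eq_ite]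
  by_cases h : d.contains (splitLine m sep).1 = true
  · rw [if_pos h, if_pos ((PySem.Dict.contains_iff_mem_keys d _).mp h)]
  · rw [if_neg h, if_neg (fun hm => h ((PySem.Dict.contains_iff_mem_keys d _).mpr hm))]

lemma pv_keys_foldl_stepF (sep : String) (L : List String) :
    (L.foldl (pvStepF sep) PySem.Dict.empty).keys
    = PySem.Set.ofList (L.map (fun m => (splitLine m sep).1)) := by
  have gen : ∀ (d : PySem.Dict String (PySem.Set String)),
      (L.foldl (pvStepF sep) d).keys
      = L.foldl (fun s m => PySem.Set.add s (splitLine m sep).1) d.keys := by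
    induction L with
    | nil => intro d; rfl
    | cons m L ih =>
      intro d
      simp only [List.foldl_cons, ih, pv_keys_stepF]
  rw [gen, ← pv_addfold_eq_ofList]
  rfl

-- membership / nodup of the inter/union folds
lemma pv_mem_foldl_inter (l : List (PySem.Set String)) (s : PySem.Set String) (x : String) :
    x ∈ l.foldl PySem.Set.inter s ↔ x ∈ s ∧ ∀ t ∈ l, x ∈ t := by
  induction l generalizing s with
  | nil => simp
  | cons t l ih => simp [ih, PySem.Set.mem_inter, and_assoc]

lemma pv_mem_foldl_union (l : List (PySem.Set String)) (s : PySem.Set String) (x : String) :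
    x ∈ l.foldl PySem.Set.union s ↔ x ∈ s ∨ ∃ t ∈ l, x ∈ t := by
  induction l generalizing s with
  | nil => simp
  | cons t l ih => simp [ih, PySem.Set.mem_union, or_assoc]

lemma pv_nodup_foldl_inter (l : List (PySem.Set String)) (s : PySem.Set String)
    (h : s.Nodup) : (l.foldl PySem.Set.inter s).Nodup := by
  induction l generalizing s with
  | nil => exact h
  | cons t l ih => exact ih _ (PySem.Set.nodup_inter _ _ h)

lemma pv_nodup_foldl_union (l : List (PySem.Set String)) (s : PySem.Set String)
    (h : s.Nodup) : (l.foldl PySem.Set.union s).Nodup := by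
  induction l generalizing s with
  | nil => exact h
  | cons t l ih => exact ih _ (PySem.Set.nodup_union _ _ h)

-- ===== VERDICT (by name: the statement is the Claim_ definition above) =====
lemma pv_assemble (L : PySem.Dict String (PySem.Set String)) (R : PySem.Set String)
    (q : String × PySem.Set String → Bool) (keepb : String → Bool)
    (hq : ∀ p, q p = keepb p.1)
    (hnR : R.Nodup) (hnK : L.keys.Nodup)
    (hpt : ∀ x ∈ L.keys, PySem.Set.contains R x = keepb x)
    (hRK : ∀ x ∈ R, x ∈ L.keys) :
    (PySem.List.sorted R (fun x => x) false,
     (L.keys.foldl (fun d f => if PySem.Set.contains R f then d else d.erase f) L).items)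
    = (PySem.List.sorted (PySem.Dict.mk (L.items.filter q)).keys (fun x => x) false,
       (PySem.Dict.mk (L.items.filter q)).items) := by
  have hfilter : L.items.filter (fun p => PySem.Set.contains R p.1) = L.items.filter q := by
    refine List.filter_congr (fun p hp => ?_)
    rw [hq p]
    exact hpt p.1 (List.mem_map_of_mem hp)
  have hkeysB : (PySem.Dict.mk (L.items.filter q)).keys = L.keys.filter keepb := by
    have hq' : q = fun p => keepb p.1 := funext hq
    rw [PySem.Dict.keys_mk, hq']
    rw [show (fun (p : String × PySem.Set String) => keepb p.1) = keepb ∘ (fun p => p.1) from rfl,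
        ← List.filter_map]
    rfl
  refine Prod.ext ?_ ?_
  · -- sorted component
    rw [hkeysB]
    refine PySem.List.sorted_eq_sorted_of_perm _ _ _ (fun a b h => h) ?_
    rw [List.perm_ext_iff_of_nodup hnR (hnK.filter _)]
    intro a
    rw [List.mem_filter]
    constructor
    · intro ha
      have hk := hRK a ha
      refine ⟨hk, ?_⟩
      rw [← hpt a hk]
      exact (PySem.Set.contains_iff _ _).mpr ha
    · rintro ⟨hk, hkeep⟩
      have := hpt a hk
      rw [hkeep] at this
      exact (PySem.Set.contains_iff _ _).mp this
  · rw [pv_prune_eq_filt R L]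
    exact hfilter
lemma pv_main (ms0 : List String) (rest : List (List String)) (anyAll sep : String) :
    sliceAndDice_py (ms0 :: rest) anyAll sep = sliceAndDice_py_alt (ms0 :: rest) anyAll sep := by
  unfold sliceAndDice_py sliceAndDice_py_alt
  dsimp only []
  rw [pvA_outer_split sep (ms0 :: rest) (PySem.Dict.empty, []),
      pvB_lines_eq sep (ms0 :: rest) PySem.Dict.empty]
  simp only [List.nil_append, List.map_cons, List.headD_cons, List.drop_succ_cons,
    List.drop_zero]
  apply pv_assemble _ _ _
    (fun x => if anyAll == "all" then
        (ms0 :: rest).all (fun ms => ms.any (fun m => (splitLine m sep).1 == x)) else true)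
  · intro p; rfl
  · -- R nodup
    by_cases hall : (anyAll == "all") = true
    · simp only [hall, if_true]
      exact pv_nodup_foldl_inter _ _ (PySem.Set.nodup_ofList _)
    · simp only [hall, if_false, Bool.false_eq_true]
      exact pv_nodup_foldl_union _ _ (PySem.Set.nodup_ofList _)
  · -- keys nodup
    rw [pv_keys_foldl_stepF]
    exact PySem.Set.nodup_ofList _
  · -- pointwise contains = keep on keys
    intro x hx
    rw [pv_keys_foldl_stepF] at hx
    rw [Bool.eq_iff_iff, PySem.Set.contains_iff]
    by_cases hall : (anyAll == "all") = true
    · simp only [hall, if_true, pv_mem_foldl_inter]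
      simp only [PySem.Set.mem_ofList, List.mem_map, List.all_eq_true, List.any_eq_true,
        beq_iff_eq, List.forall_mem_cons, forall_exists_index, and_imp,
        forall_apply_eq_imp_iff₂]
    · simp only [hall, if_false, Bool.false_eq_true, pv_mem_foldl_union]
      simp only [iff_true]
      simp only [PySem.Set.mem_ofList, List.mem_map, List.mem_flatten] at hx
      obtain ⟨m, ⟨ms, hms, hm⟩, rfl⟩ := hx
      cases hms with
      | head => exact Or.inl (by simpa [PySem.Set.mem_ofList, List.mem_map] using ⟨m, hm, rfl⟩)
      | tail _ h => exact Or.inr ⟨_, List.mem_map_of_mem h, by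
          simpa [PySem.Set.mem_ofList, List.mem_map] using ⟨m, hm, rfl⟩⟩
  · -- R ⊆ keys
    intro x hxR
    rw [pv_keys_foldl_stepF]
    simp only [PySem.Set.mem_ofList, List.mem_map, List.mem_flatten]
    by_cases hall : (anyAll == "all") = true
    · simp only [hall, if_true, pv_mem_foldl_inter] at hxR
      have h0 := hxR.1
      simp only [PySem.Set.mem_ofList, List.mem_map] at h0
      obtain ⟨m, hm, rfl⟩ := h0
      exact ⟨m, ⟨ms0, List.mem_cons_self, hm⟩, rfl⟩
    · simp only [hall, if_false, Bool.false_eq_true, pv_mem_foldl_union] at hxR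
      rcases hxR with h0 | ⟨t, ht, hxt⟩
      · simp only [PySem.Set.mem_ofList, List.mem_map] at h0
        obtain ⟨m, hm, rfl⟩ := h0
        exact ⟨m, ⟨ms0, List.mem_cons_self, hm⟩, rfl⟩
      · obtain ⟨ms, hms, rfl⟩ := List.mem_map.mp ht
        simp only [PySem.Set.mem_ofList, List.mem_map] at hxt
        obtain ⟨m, hm, rfl⟩ := hxt
        exact ⟨m, ⟨ms, List.mem_cons_of_mem _ hms, hm⟩, rfl⟩

theorem sliceAndDice_py_spec : Claim_equal_sliceAndDice_py := by
  intro out_ anyAll separator _hDom hPre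
  obtain ⟨ms0, rest, rfl⟩ := List.exists_cons_of_ne_nil hPre.1
  exact pv_main ms0 rest anyAll separator
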